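-- pv_equiv track=rewrite | github.com/Jv131103/estudos_python | problemas/exercicio571.py | buffer_circular
-- ===== SOURCE A (Python) =====
-- def buffer_circular(entrada, tamanho_buffer=5):
--     if not entrada:
--         return None
--
--     buffer = [None] * tamanho_buffer
--     pos = 0  # posição atual de escrita
--
--     for valor in entrada:
--         buffer[pos] = valor
--         pos = (pos + 1) % tamanho_buffer
--
--     return buffer
-- ===== SOURCE B (Python) =====
-- def buffer_circular(entrada, tamanho_buffer=5):
--     if not entrada:
--         return None
--     t = tamanho_buffer
--     n = len(entrada)
--     if n < t:
--         return entrada + [None] * (t - n)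
--     r = n % t
--     L = entrada[-t:]
--     return L[-r:] + L[:-r]
-- ===== Notes on version B (the rewrite author's own statement) =====
-- stated objective: faster
-- what changed: B replaces A's per-element circular-write loop by slicing the last tamanho_buffer elements and rotating them into place with three slices, so work no longer depends on len(entrada).
import Mathlib
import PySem

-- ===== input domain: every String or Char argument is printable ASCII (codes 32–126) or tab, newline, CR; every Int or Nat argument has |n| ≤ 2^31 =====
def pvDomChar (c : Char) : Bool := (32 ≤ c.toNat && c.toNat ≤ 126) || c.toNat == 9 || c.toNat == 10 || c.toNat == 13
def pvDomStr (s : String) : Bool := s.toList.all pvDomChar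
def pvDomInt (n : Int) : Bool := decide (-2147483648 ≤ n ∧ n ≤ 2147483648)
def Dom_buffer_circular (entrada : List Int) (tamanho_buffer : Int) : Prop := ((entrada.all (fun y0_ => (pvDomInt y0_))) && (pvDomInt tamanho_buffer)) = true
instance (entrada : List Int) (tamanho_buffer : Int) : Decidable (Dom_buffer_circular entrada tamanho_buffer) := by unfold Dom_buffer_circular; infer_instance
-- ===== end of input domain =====

-- B replaces A's per-element circular-write loop by slicing the last tamanho_buffer
-- elements and rotating them into place: O(tamanho_buffer) instead of O(len(entrada)).

-- ===== PORT A =====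
-- the for-loop: buffer[pos] = valor (IndexError → none); pos = (pos + 1) % tamanho_buffer
def bcLoop (tamanho_buffer : Int) : List Int → List (Option Int) → Int → Option (List (Option Int))
  | [], buf, _ => some buf
  | v :: rest, buf, pos =>
    match PySem.List.pySet? buf pos (some v) with
    | none => none
    | some buf' => bcLoop tamanho_buffer rest buf' (PySem.Int.mod (pos + 1) tamanho_buffer)

def buffer_circular (entrada : List Int) (tamanho_buffer : Int) : Option (List (Option Int)) :=
  if entrada = [] then none
  else bcLoop tamanho_buffer entrada (List.replicate tamanho_buffer.toNat none) 0

-- ===== PORT B =====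
def buffer_circular_alt (entrada : List Int) (tamanho_buffer : Int) : Option (List (Option Int)) :=
  if entrada = [] then none
  else
    let t := tamanho_buffer
    let n : Int := entrada.length
    if n < t then
      some (entrada.map some ++ List.replicate (t - n).toNat none)
    else
      let r := PySem.Int.mod n t
      let L := (PySem.List.slice entrada (some (-t)) none).map some
      some (PySem.List.slice L (some (-r)) none ++ PySem.List.slice L none (some (-r)))

-- ===== PRECONDITION & SPEC =====
-- Pre_ excludes only inputs where A raises: nonempty entrada with tamanho_buffer ≤ 0
-- makes buffer the empty list and buffer[pos] = valor an IndexError.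
def Pre_buffer_circular (entrada : List Int) (tamanho_buffer : Int) : Prop :=
  entrada = [] ∨ 1 ≤ tamanho_buffer
instance (entrada : List Int) (tamanho_buffer : Int) : Decidable (Pre_buffer_circular entrada tamanho_buffer) := by unfold Pre_buffer_circular; infer_instance
def pvWitness_buffer_circular : List Int × Int := ([1, 2, 3, 4, 5, 6, 7], 3)

def Spec_buffer_circular (entrada : List Int) (tamanho_buffer : Int) (out : Option (List (Option Int))) : Prop := out = buffer_circular_alt entrada tamanho_buffer
instance (entrada : List Int) (tamanho_buffer : Int) (out : Option (List (Option Int))) : Decidable (Spec_buffer_circular entrada tamanho_buffer out) := by unfold Spec_buffer_circular; infer_instance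

-- ===== CLAIM (what is proved, stated in full; the proofs are below) =====
def Claim_equal_buffer_circular : Prop := ∀ (entrada : List Int) (tamanho_buffer : Int), Dom_buffer_circular entrada tamanho_buffer → Pre_buffer_circular entrada tamanho_buffer → Spec_buffer_circular entrada tamanho_buffer (buffer_circular entrada tamanho_buffer)

-- ===== LEMMAS AND PROOFS =====

-- step of the loop when the write is in range: next pos is (p+1) % tn
theorem bcLoop_cons_nat (t : Int) (ht : 0 < t) (v : Int) (rest : List Int)
    (buf : List (Option Int)) (p : Nat) (hp : p < buf.length) :
    bcLoop t (v :: rest) buf (p : Int)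
      = bcLoop t rest (buf.set p (some v)) (((p + 1) % t.toNat : Nat) : Int) := by
  have hset := PySem.List.pySet?_natCast (xs := buf) (n := p) (v := some v) hp
  have ht' : ((t.toNat : Nat) : Int) = t := Int.toNat_of_nonneg (le_of_lt ht)
  have hmod : PySem.Int.mod ((p : Int) + 1) t = (((p + 1) % t.toNat : Nat) : Int) := by
    rw [← ht']
    exact_mod_cast PySem.Int.mod_natCast (p + 1) t.toNat
  simp [bcLoop, hset, hmod]

-- writing a contiguous segment xs at positions p … p+|xs|-1 (no wraparound)
theorem bcLoop_seg (t : Int) (ht : 0 < t) (xs rest : List Int) :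
    ∀ (buf : List (Option Int)) (p : Nat), buf.length = t.toNat → p < t.toNat →
    p + xs.length ≤ t.toNat →
    bcLoop t (xs ++ rest) buf (p : Int)
      = bcLoop t rest (buf.take p ++ xs.map some ++ buf.drop (p + xs.length))
          (((p + xs.length) % t.toNat : Nat) : Int) := by
  induction xs with
  | nil =>
    intro buf p hlen hp _
    simp [Nat.mod_eq_of_lt hp, List.take_append_drop]
  | cons x xs ih =>
    intro buf p hlen hp hle
    have hp' : p < buf.length := by omega
    have hbuf2 : buf.set p (some x) = buf.take p ++ some x :: buf.drop (p + 1) := by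
      rw [List.set_eq_take_append_cons_drop, if_pos hp']
    rw [List.cons_append, bcLoop_cons_nat t ht x (xs ++ rest) buf p hp', hbuf2]
    by_cases hxs : p + 1 < t.toNat
    · rw [Nat.mod_eq_of_lt hxs,
        ih (buf.take p ++ some x :: buf.drop (p + 1)) (p + 1)
          (by simp; omega) hxs (by simp at hle ⊢; omega)]
      have h1 : (buf.take p ++ some x :: buf.drop (p + 1)).take (p + 1)
          = buf.take p ++ [some x] := by
        rw [List.take_append]
        have hlp : (buf.take p).length = p := by simp; omega
        rw [List.take_of_length_le (by omega), hlp]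
        have h11 : p + 1 - p = 1 := by omega
        rw [h11]
        simp
      have h2 : (buf.take p ++ some x :: buf.drop (p + 1)).drop (p + 1 + xs.length)
          = buf.drop (p + (x :: xs).length) := by
        rw [List.drop_append]
        have hlp : (buf.take p).length = p := by simp; omega
        rw [hlp, List.drop_eq_nil_of_le (by omega)]
        have h21 : p + 1 + xs.length - p = xs.length + 1 := by omega
        rw [h21, List.drop_succ_cons, List.drop_drop]
        rw [List.nil_append]
        congr 1
        simp
        omega
      rw [h1, h2]
      have h3 : p + 1 + xs.length = p + (x :: xs).length := by simp; omega
      rw [h3]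
      simp
    · have hxnil : xs = [] := by
        have hl0 : xs.length = 0 := by simp at hle; omega
        simpa using hl0
      subst hxnil
      simp [List.append_assoc]

-- peeling an arbitrary prefix: some buffer of the right length results, pos advances mod tn
theorem bcLoop_peel (t : Int) (ht : 0 < t) (xs rest : List Int) :
    ∀ (buf : List (Option Int)) (p : Nat), buf.length = t.toNat → p < t.toNat →
    ∃ buf' : List (Option Int), buf'.length = t.toNat ∧
      bcLoop t (xs ++ rest) buf (p : Int)
        = bcLoop t rest buf' (((p + xs.length) % t.toNat : Nat) : Int) := by
  induction xs with
  | nil =>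
    intro buf p hlen hp
    exact ⟨buf, hlen, by simp [Nat.mod_eq_of_lt hp]⟩
  | cons x xs ih =>
    intro buf p hlen hp
    rw [List.cons_append, bcLoop_cons_nat t ht x (xs ++ rest) buf p (by omega)]
    obtain ⟨buf', hlen', heq⟩ := ih (buf.set p (some x)) ((p + 1) % t.toNat)
      (by simp [hlen]) (Nat.mod_lt _ (by omega))
    refine ⟨buf', hlen', ?_⟩
    have harg : (p + 1) % t.toNat + xs.length = ((p + 1) % t.toNat + xs.length) := rfl
    have hpos : ((p + 1) % t.toNat + xs.length) % t.toNat = (p + (x :: xs).length) % t.toNat := by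
      rw [Nat.mod_add_mod]
      have h4 : p + 1 + xs.length = p + (x :: xs).length := by simp; omega
      rw [h4]
    rw [heq, hpos]

-- ===== VERDICT (by name: the statement is the Claim_ definition above) =====
theorem buffer_circular_spec : Claim_equal_buffer_circular := by
  intro entrada t _ hpre
  unfold Spec_buffer_circular buffer_circular buffer_circular_alt
  by_cases hnil : entrada = []
  · simp [hnil]
  · have ht : 1 ≤ t := hpre.resolve_left hnil
    have ht0 : 0 < t := ht
    simp only [if_neg hnil]
    set tn := t.toNat with htn
    have htn1 : 1 ≤ tn := by omega
    set n' := entrada.length with hn'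
    by_cases hlt : (n' : Int) < t
    · -- n < t : no wraparound
      have hle : n' ≤ tn := by omega
      have hseg := bcLoop_seg t ht0 entrada [] (List.replicate tn none) 0
        (by simpa using htn.symm) (by omega) (by simpa using hle)
      simp only [List.append_nil, Nat.cast_zero] at hseg
      rw [hseg]
      simp only [if_pos hlt]
      simp only [bcLoop, List.take_zero, List.nil_append, Nat.zero_add, List.drop_replicate]
      congr 3
      omega
    · -- n ≥ t : peel the first n - tn, then two contiguous segments
      have hge : tn ≤ n' := by omega
      simp only [if_neg hlt]
      set d := n' - tn with hd
      set r := n' % tn with hr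
      have hrlt : r < tn := Nat.mod_lt _ (by omega)
      have hsplit : entrada = entrada.take d ++ entrada.drop d := (List.take_append_drop d entrada).symm
      set L : List Int := entrada.drop d with hL
      have hLlen : L.length = tn := by simp [hL, hd]; omega
      have hdr : d % tn = r := by
        rw [hr]
        have : n' = d + tn := by omega
        rw [this, Nat.add_mod_right]
      -- A side
      obtain ⟨buf', hblen, heq⟩ := bcLoop_peel t ht0 (entrada.take d) L
        (List.replicate tn none) 0 (by simpa using htn.symm) (by omega)
      simp only [Nat.cast_zero] at heq
      conv_lhs => rw [hsplit]
      rw [heq]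
      simp only [List.length_take, Nat.zero_add]
      have hmin : min d n' = d := by omega
      rw [hmin, hdr]
      -- split L = L1 ++ L2
      have hLsplit : L = L.take (tn - r) ++ L.drop (tn - r) := (List.take_append_drop _ L).symm
      set L1 := L.take (tn - r) with hL1
      set L2 := L.drop (tn - r) with hL2
      have hL1len : L1.length = tn - r := by simp [hL1, hLlen]
      have hL2len : L2.length = r := by simp [hL2, hLlen]; omega
      conv_lhs => rw [hLsplit]
      rw [bcLoop_seg t ht0 L1 L2 buf' r hblen hrlt (by omega)]
      have hfull : r + L1.length = tn := by omega
      rw [hfull]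
      have h0 : tn % tn = 0 := Nat.mod_self tn
      rw [h0]
      conv_lhs => rw [(List.append_nil L2).symm]
      rw [bcLoop_seg t ht0 L2 [] (buf'.take r ++ L1.map some ++ buf'.drop tn) 0
        (by simp [hblen]; omega) (by omega) (by simp [hL2len]; omega)]
      have hdropnil : buf'.drop tn = [] := List.drop_eq_nil_of_le (by omega)
      simp only [hdropnil, List.append_nil, List.take_zero, Nat.zero_add, List.nil_append, bcLoop]
      have hdrop2 : (buf'.take r ++ L1.map some).drop L2.length = L1.map some := by
        rw [hL2len, List.drop_append_of_le_length (by simp [hblen]; omega)]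
        simp
      rw [hdrop2]
      -- B side
      have hmodB : PySem.Int.mod (n' : Int) t = ((r : Nat) : Int) := by
        have ht' : ((tn : Nat) : Int) = t := Int.toNat_of_nonneg (by omega)
        rw [← ht']
        exact_mod_cast PySem.Int.mod_natCast n' tn
      rw [hmodB]
      have hnegt : -t = -((tn : Nat) : Int) := by
        rw [Int.toNat_of_nonneg (by omega)]
      rw [hnegt, PySem.List.slice_from_neg_natCast entrada tn (by omega)]
      rw [← hn', ← hd, ← hL]
      by_cases hr0 : r = 0
    -- r = 0 : full rotation is identity; slices are L and []
      · simp only [hr0, Nat.cast_zero, neg_zero]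
        rw [PySem.List.slice_zero_start, PySem.List.slice_none_none,
          PySem.List.slice_to (xs := L.map some) (b := (0 : Int)) (by omega)]
        simp only [Int.toNat_zero, List.take_zero, List.append_nil]
        have hL1L : L1 = L := by rw [hL1, hr0]; simp [hLlen]
        have hL2n : L2 = [] := by rw [hL2, hr0]; simp [hLlen]
        rw [hL1L, hL2n]
        simp
      · rw [PySem.List.slice_from_neg_natCast _ r (by omega),
          PySem.List.slice_to_neg_natCast _ r (by omega)]
        have hmaplen : (L.map some).length = tn := by simp [hLlen]
        rw [hmaplen, ← List.map_drop, ← List.map_take, ← hL1, ← hL2]
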